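-- pv_equiv track=rewrite | github.com/liliyaexp/UCD-ECS145 | HW1/ecs145hw1.py | check_indicator
-- ===== SOURCE A (Python) =====
-- def check_indicator(x, ncol):
--     '''
--     Goal:
--       Check the variable is indicative or not
--     Input Parameters:
--       x -- the whole matrix
--       ncol -- the number of columns
--     Output:
--       a list of column indexes of indicator variables
--     '''
--     # indc_set: all column indexes
--     indc_set = []
--     # get x transpose
--     xt = map(list, zip(*x))
--
--     # get unique value for each column
--     xt_set = map(set, xt)
--     # get indicator indexes
--     for index, col in enumerate(xt_set):
--         if col == set([0, 1]) or col == set([0]) or col == set([1]):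
--             indc_set.append(index)
--     return indc_set
-- ===== SOURCE B (Python) =====
-- def check_indicator(x, ncol):
--     # Row-major single pass: no transpose, no per-column sets.
--     # Maintain a flag per column (up to the shortest row, as zip(*x) would cut)
--     # that stays True while every value seen in that column is 0 or 1.
--     if not x:
--         return []
--     m = min(len(r) for r in x)
--     ok = [True] * m
--     for r in x:
--         ok = [ok[j] and r[j] in (0, 1) for j in range(m)]
--     return [j for j in range(m) if ok[j]]
-- ===== Notes on version B (the rewrite author's own statement) =====
-- stated objective: alternative
-- what changed: Replaces A's transpose-then-per-column-set construction with a single row-major pass that maintains a boolean flag per column (up to the shortest row), then emits the indices whose flag survived; no transpose and no sets are built.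
import Mathlib
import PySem

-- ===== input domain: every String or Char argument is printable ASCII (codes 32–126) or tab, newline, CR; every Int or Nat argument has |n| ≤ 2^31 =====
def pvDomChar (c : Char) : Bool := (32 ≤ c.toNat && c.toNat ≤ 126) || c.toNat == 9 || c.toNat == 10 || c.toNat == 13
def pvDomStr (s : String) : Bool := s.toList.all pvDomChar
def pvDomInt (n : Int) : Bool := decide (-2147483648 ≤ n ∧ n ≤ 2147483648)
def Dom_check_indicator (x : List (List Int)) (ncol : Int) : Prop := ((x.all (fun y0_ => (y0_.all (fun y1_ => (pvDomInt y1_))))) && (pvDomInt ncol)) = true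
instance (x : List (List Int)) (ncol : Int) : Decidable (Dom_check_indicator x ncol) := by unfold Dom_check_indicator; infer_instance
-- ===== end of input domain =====

-- B replaces A's transpose-then-per-column-set test by a single row-major pass
-- maintaining one boolean flag per column; both programs ignore ncol, as the Python does.

-- zip(*x): columns up to the shortest row (zip of no iterables is empty)
def zipStar (x : List (List Int)) : List (List Int) :=
  match x with
  | [] => []
  | r :: rs =>
      (List.range (rs.foldl (fun m t => min m t.length) r.length)).map
        (fun j => (r :: rs).map (fun t => t.getD j 0))

-- ===== PORT A =====
def check_indicator (x : List (List Int)) (ncol : Int) : List Int :=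
  (PySem.List.enumerate ((zipStar x).map PySem.Set.ofList) 0).foldl
    (fun indc_set p =>
      if PySem.Set.equal p.2 (PySem.Set.ofList [0, 1]) ||
         PySem.Set.equal p.2 (PySem.Set.ofList [0]) ||
         PySem.Set.equal p.2 (PySem.Set.ofList [1])
      then indc_set ++ [p.1] else indc_set) []

-- ===== PORT B =====
-- single row-major pass: ok[j] stays true while every value seen in column j is 0 or 1
-- (r[j] with j < min of the row lengths is always in range, so getD is exact here)
def check_indicator_alt (x : List (List Int)) (ncol : Int) : List Int :=
  match x with
  | [] => []
  | r :: rs =>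
      let m := rs.foldl (fun acc t => min acc t.length) r.length
      let ok := (r :: rs).foldl
        (fun ok row =>
          (List.range m).map (fun j => ok.getD j false && (row.getD j 0 == 0 || row.getD j 0 == 1)))
        (List.replicate m true)
      ((List.range m).filter (fun j => ok.getD j false)).map Int.ofNat

-- ===== PRECONDITION & SPEC =====
def Spec_check_indicator (x : List (List Int)) (ncol : Int) (out : List Int) : Prop := out = check_indicator_alt x ncol
instance (x : List (List Int)) (ncol : Int) (out : List Int) : Decidable (Spec_check_indicator x ncol out) := by unfold Spec_check_indicator; infer_instance

-- ===== CLAIM (what is proved, stated in full; the proofs are below) =====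
def Claim_equal_check_indicator : Prop := ∀ (x : List (List Int)) (ncol : Int), Dom_check_indicator x ncol → Spec_check_indicator x ncol (check_indicator x ncol)

-- ===== LEMMAS AND PROOFS =====

-- A's per-column set test equals "non-empty and all values in {0,1}"
lemma cond_iff (col : List Int) :
    (PySem.Set.equal (PySem.Set.ofList col) (PySem.Set.ofList [0, 1]) ||
     PySem.Set.equal (PySem.Set.ofList col) (PySem.Set.ofList [0]) ||
     PySem.Set.equal (PySem.Set.ofList col) (PySem.Set.ofList [1]))
    = decide (col ≠ [] ∧ col.all (fun v => v == 0 || v == 1)) := by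
  rw [Bool.eq_iff_iff]
  simp [PySem.Set.equal_iff, PySem.Set.mem_ofList, List.all_eq_true]
  constructor
  · rintro ((h | h) | h)
    · exact ⟨fun hc => absurd ((h 0).mpr (Or.inl rfl)) (by simp [hc]),
        fun v hv => (h v).mp hv⟩
    · exact ⟨fun hc => absurd ((h 0).mpr rfl) (by simp [hc]),
        fun v hv => Or.inl ((h v).mp hv)⟩
    · exact ⟨fun hc => absurd ((h 1).mpr rfl) (by simp [hc]),
        fun v hv => Or.inr ((h v).mp hv)⟩
  · rintro ⟨hne, hall⟩
    obtain ⟨v, hv⟩ := List.exists_mem_of_ne_nil col hne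
    by_cases h0 : (0 : Int) ∈ col <;> by_cases h1 : (1 : Int) ∈ col
    · exact Or.inl (Or.inl (fun w => ⟨hall w, by rintro (rfl | rfl) <;> assumption⟩))
    · refine Or.inl (Or.inr (fun w => ⟨fun hw => ?_, by rintro rfl; exact h0⟩))
      rcases hall w hw with rfl | rfl
      · rfl
      · exact absurd hw h1
    · refine Or.inr (fun w => ⟨fun hw => ?_, by rintro rfl; exact h1⟩)
      rcases hall w hw with rfl | rfl
      · exact absurd hw h0
      · rfl
    · rcases hall v hv with rfl | rfl
      · exact absurd hv h0
      · exact absurd hv h1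

lemma enumerate_map {α β : Type} (f : α → β) (l : List α) (s : Int) :
    PySem.List.enumerate (l.map f) s = (PySem.List.enumerate l s).map (fun p => (p.1, f p.2)) := by
  induction l generalizing s with
  | nil => simp [PySem.List.enumerate_nil]
  | cons a t ih => simp [PySem.List.enumerate_cons, ih]

lemma enumerate_range (m : ℕ) :
    PySem.List.enumerate (List.range m) 0 = (List.range m).map (fun j => (Int.ofNat j, j)) := by
  induction m with
  | zero => simp [PySem.List.enumerate_nil]
  | succ n ih =>
      rw [List.range_succ, PySem.List.enumerate_append, ih]
      simp [PySem.List.enumerate_cons, PySem.List.enumerate_nil]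

-- A's append-loop as a filter
lemma foldl_append_filter (l : List (Int × List Int)) (q : List Int → Bool) (acc : List Int) :
    l.foldl (fun s p => if q p.2 then s ++ [p.1] else s) acc
      = acc ++ (l.filter (fun p => q p.2)).map Prod.fst := by
  induction l generalizing acc with
  | nil => simp
  | cons a t ih =>
      simp only [List.foldl_cons, List.filter_cons]
      by_cases h : q a.2
      · rw [if_pos h, if_pos h, ih]; simp
      · rw [if_neg (by simp [h]), if_neg (by simp [h]), ih]

-- getD on a map over range
lemma getD_map_range (m j : ℕ) (f : ℕ → Bool) (hj : j < m) :
    ((List.range m).map f).getD j false = f j := by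
  rw [List.getD_eq_getElem?_getD, List.getElem?_map, List.getElem?_range hj]
  rfl

-- B's row fold computes, at each column j < m, "every row's value at j is 0 or 1"
lemma fold_ok (m : ℕ) (rows : List (List Int)) (ok0 : List Bool) (j : ℕ) (hj : j < m) :
    ((rows.foldl
        (fun ok row =>
          (List.range m).map (fun i => ok.getD i false && (row.getD i 0 == 0 || row.getD i 0 == 1)))
        ok0).getD j false)
      = (ok0.getD j false && rows.all (fun t => t.getD j 0 == 0 || t.getD j 0 == 1)) := by
  induction rows generalizing ok0 with
  | nil => simp
  | cons t ts ih =>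
      rw [List.foldl_cons, ih, getD_map_range m j _ hj]
      simp [Bool.and_assoc]

-- ===== VERDICT (by name: the statement is the Claim_ definition above) =====
theorem check_indicator_spec : Claim_equal_check_indicator := by
  intro x ncol _
  unfold Spec_check_indicator
  match x with
  | [] => rfl
  | r :: rs =>
      unfold check_indicator check_indicator_alt zipStar
      set m := rs.foldl (fun acc t => min acc t.length) r.length with hm
      rw [enumerate_map, enumerate_map, enumerate_range]
      rw [List.foldl_map]
      rw [foldl_append_filter _
        (fun col => PySem.Set.equal (PySem.Set.ofList col) (PySem.Set.ofList [0, 1]) ||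
          PySem.Set.equal (PySem.Set.ofList col) (PySem.Set.ofList [0]) ||
          PySem.Set.equal (PySem.Set.ofList col) (PySem.Set.ofList [1]))]
      simp only [List.nil_append, List.filter_map, List.map_map]
      congr 1
      · apply List.filter_congr
        intro j hjmem
        have hj : j < m := List.mem_range.mp hjmem
        simp only [Function.comp]
        rw [cond_iff, fold_ok m (r :: rs) (List.replicate m true) j hj]
        simp [List.all_map, List.getElem?_replicate, hj, List.all_eq_true]
        rw [Bool.eq_iff_iff]
        simp [List.all_eq_true]
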